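-- pv_equiv track=rewrite | github.com/fghisoni/ShadowQuantumLinearSolver | RQLSP1/Pauli_algebra_v3.py | simplify_pauli_string
-- ===== SOURCE A (Python) =====
-- def simplify_pauli_string(pauli_string):
--     """
--     Simplify a Pauli string expression.
--
--     Parameters:
--     pauli_string (str): Input Pauli string expression.
--
--     Returns:
--     str: Simplified Pauli string expression.
--     """
--     pauli_operators = {'I', 'X', 'Y', 'Z'}
--
--     simplified_string = ''
--     current_operator = ''
--     current_multiplier = 1
--
--     for char in pauli_string:
--         if char in pauli_operators:
--             if current_operator == '':
--                 current_operator = char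
--             else:
--                 if current_operator == 'I':
--                     current_operator = char
--                 elif current_operator == char:
--                     current_operator = 'I'
--                     current_multiplier *= 1
--                 else:
--                     intermediate_str = current_operator + char
--                     if 'X' in intermediate_str and 'Z' in intermediate_str:
--                         current_multiplier *= complex(0,-1) if  current_operator=='X' else complex(0,1)
--                         current_operator = 'Y'
--                     elif 'X' in intermediate_str and 'Y' in intermediate_str:
--                         current_multiplier *= complex(0,1) if  current_operator=='X' else complex(0,-1)
--                         current_operator = 'Z'
--                     elif 'Z' in intermediate_str and 'Y' in intermediate_str:
--                         current_multiplier *= complex(0,-1) if  current_operator=='Z' else complex(0,1)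
--                         current_operator = 'X'
--
--         elif char.isdigit():
--             current_multiplier *= int(char)
--
--     if current_multiplier == 1:
--         simplified_string += current_operator
--     elif current_multiplier == -1:
--         simplified_string += '-' + current_operator
--     elif current_multiplier==complex(0,1):
--         simplified_string += 'i'+current_operator
--     elif current_multiplier==complex(0,-1):
--         simplified_string += '-i'+current_operator
--
--     return simplified_string
-- ===== SOURCE B (Python) =====
-- def simplify_pauli_string(pauli_string):
--     """
--     Simplify a Pauli string expression.
--
--     Symplectic form: each operator is a pair of bits (x, z) with
--     X=(1,0), Z=(0,1), Y=(1,1) (with Y = i*X*Z), I=(0,0).  The product of the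
--     operators is accumulated by adding bits mod 2, picking up a sign whenever
--     an incoming X-bit moves past the stored Z-bit; digit characters scale the
--     complex multiplier directly.
--     """
--     x = z = 0
--     m = 1 + 0j
--     seen = False
--     for ch in pauli_string:
--         if ch in 'IXYZ':
--             seen = True
--             if ch == 'X':
--                 xc, zc, pc = 1, 0, 1
--             elif ch == 'Z':
--                 xc, zc, pc = 0, 1, 1
--             elif ch == 'Y':
--                 xc, zc, pc = 1, 1, 1j  # Y = i*X*Z
--             else:
--                 xc, zc, pc = 0, 0, 1
--             if z and xc:  # commuting the incoming X past the stored Z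
--                 m = -m
--             m *= pc
--             x = (x + xc) % 2
--             z = (z + zc) % 2
--         elif ch.isdigit():
--             m *= int(ch)
--     if not seen:
--         op = ''
--     elif x and z:
--         op = 'Y'
--         m *= -1j  # X*Z = -i*Y
--     elif x:
--         op = 'X'
--     elif z:
--         op = 'Z'
--     else:
--         op = 'I'
--     if m == 1:
--         return op
--     if m == -1:
--         return '-' + op
--     if m == 1j:
--         return 'i' + op
--     if m == -1j:
--         return '-i' + op
--     return ''
-- ===== Notes on version B (the rewrite author's own statement) =====
-- stated objective: alternative
-- what changed: Replaces A's pairwise case table of Pauli products (string concatenation and membership tests per operator pair) by a symplectic fold: each operator is an (x,z) bit pair combined by mod-2 addition with an arithmetic sign/phase update of one complex multiplier, converted back to a letter at the end.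
import Mathlib
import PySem

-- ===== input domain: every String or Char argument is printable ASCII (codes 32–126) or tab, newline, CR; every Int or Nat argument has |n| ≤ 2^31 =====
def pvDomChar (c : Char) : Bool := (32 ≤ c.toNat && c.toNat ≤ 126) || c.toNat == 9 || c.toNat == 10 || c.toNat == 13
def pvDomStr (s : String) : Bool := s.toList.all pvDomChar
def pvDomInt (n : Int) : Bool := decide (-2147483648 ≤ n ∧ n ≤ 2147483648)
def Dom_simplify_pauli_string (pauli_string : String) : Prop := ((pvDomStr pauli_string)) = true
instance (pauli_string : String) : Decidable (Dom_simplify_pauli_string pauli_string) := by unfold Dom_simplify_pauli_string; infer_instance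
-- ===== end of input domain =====

-- B replaces A's pairwise Pauli-product case table by a symplectic (x,z)-bit fold with one complex multiplier; objective: alternative (same cost). Equal return value on every input.

-- ===== PORT A =====
-- Both Pythons' complex multipliers only ever hold Gaussian integers, so they are ported as
-- (re, im) : Int × Int with the multiplications written out componentwise (exact: every
-- comparison against 1/-1/i/-i has the same outcome).
def pvPauliOps : List Char := ['I', 'X', 'Y', 'Z']

def pvMulI (m : Int × Int) : Int × Int := (-m.2, m.1)      -- m * complex(0, 1)
def pvMulNegI (m : Int × Int) : Int × Int := (m.2, -m.1)   -- m * complex(0, -1)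

def pvStepA (st : String × (Int × Int)) (char : Char) : String × (Int × Int) :=
  let current_operator := st.1
  let current_multiplier := st.2
  if char ∈ pvPauliOps then
    if current_operator = "" then
      (char.toString, current_multiplier)
    else if current_operator = "I" then
      (char.toString, current_multiplier)
    else if current_operator = char.toString then
      ("I", current_multiplier)
    else
      let intermediate_str := current_operator.toList ++ [char]
      if 'X' ∈ intermediate_str ∧ 'Z' ∈ intermediate_str then
        ("Y", if current_operator = "X" then pvMulNegI current_multiplier else pvMulI current_multiplier)
      else if 'X' ∈ intermediate_str ∧ 'Y' ∈ intermediate_str then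
        ("Z", if current_operator = "X" then pvMulI current_multiplier else pvMulNegI current_multiplier)
      else if 'Z' ∈ intermediate_str ∧ 'Y' ∈ intermediate_str then
        ("X", if current_operator = "Z" then pvMulNegI current_multiplier else pvMulI current_multiplier)
      else
        (current_operator, current_multiplier)
  else if PySem.Chars.isdigit char then
    -- int(char) for a single ASCII digit is its code minus 48 (exact on the digit chars isdigit admits)
    (current_operator, (current_multiplier.1 * ((char.toNat : Int) - 48), current_multiplier.2 * ((char.toNat : Int) - 48)))
  else
    (current_operator, current_multiplier)

def simplify_pauli_string (pauli_string : String) : String :=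
  let st := pauli_string.toList.foldl pvStepA ("", (1, 0))
  let current_operator := st.1
  let current_multiplier := st.2
  if current_multiplier = ((1 : Int), (0 : Int)) then current_operator
  else if current_multiplier = ((-1 : Int), (0 : Int)) then "-" ++ current_operator
  else if current_multiplier = ((0 : Int), (1 : Int)) then "i" ++ current_operator
  else if current_multiplier = ((0 : Int), (-1 : Int)) then "-i" ++ current_operator
  else ""

-- ===== PORT B =====
-- state: (x-bit, z-bit, multiplier m as Gaussian integer, seen flag)
def pvMulC (m pc : Int × Int) : Int × Int := (m.1 * pc.1 - m.2 * pc.2, m.1 * pc.2 + m.2 * pc.1)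

def pvStepB (st : Int × Int × (Int × Int) × Bool) (ch : Char) : Int × Int × (Int × Int) × Bool :=
  let (x, z, m, seen) := st
  if ch ∈ pvPauliOps then
    let (xc, zc, pc) : Int × Int × (Int × Int) :=
      if ch = 'X' then (1, 0, (1, 0))
      else if ch = 'Z' then (0, 1, (1, 0))
      else if ch = 'Y' then (1, 1, (0, 1))
      else (0, 0, (1, 0))
    let m := if z ≠ 0 ∧ xc ≠ 0 then (-m.1, -m.2) else m
    let m := pvMulC m pc
    (PySem.Int.mod (x + xc) 2, PySem.Int.mod (z + zc) 2, m, true)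
  else if PySem.Chars.isdigit ch then
    (x, z, (m.1 * ((ch.toNat : Int) - 48), m.2 * ((ch.toNat : Int) - 48)), seen)
  else
    (x, z, m, seen)

def simplify_pauli_string_alt (pauli_string : String) : String :=
  let st := pauli_string.toList.foldl pvStepB (0, 0, (1, 0), false)
  let (x, z, m, seen) := st
  let op_m : String × (Int × Int) :=
    if seen = false then ("", m)
    else if x ≠ 0 ∧ z ≠ 0 then ("Y", pvMulNegI m)
    else if x ≠ 0 then ("X", m)
    else if z ≠ 0 then ("Z", m)
    else ("I", m)
  let op := op_m.1
  let m := op_m.2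
  if m = ((1 : Int), (0 : Int)) then op
  else if m = ((-1 : Int), (0 : Int)) then "-" ++ op
  else if m = ((0 : Int), (1 : Int)) then "i" ++ op
  else if m = ((0 : Int), (-1 : Int)) then "-i" ++ op
  else ""

-- ===== PRECONDITION & SPEC =====
def Spec_simplify_pauli_string (pauli_string : String) (out : String) : Prop := out = simplify_pauli_string_alt pauli_string
instance (pauli_string : String) (out : String) : Decidable (Spec_simplify_pauli_string pauli_string out) := by unfold Spec_simplify_pauli_string; infer_instance

-- ===== CLAIM (what is proved, stated in full; the proofs are below) =====
def Claim_equal_simplify_pauli_string : Prop := ∀ (pauli_string : String), Dom_simplify_pauli_string pauli_string → Spec_simplify_pauli_string pauli_string (simplify_pauli_string pauli_string)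

-- ===== LEMMAS AND PROOFS =====

-- well-formedness of B's state
def pvWF (b : Int × Int × (Int × Int) × Bool) : Prop :=
  (b.1 = 0 ∨ b.1 = 1) ∧ (b.2.1 = 0 ∨ b.2.1 = 1) ∧
  (b.2.2.2 = false → b.1 = 0 ∧ b.2.1 = 0)

-- abstraction: A's state computed from B's state
def pvAbs (b : Int × Int × (Int × Int) × Bool) : String × (Int × Int) :=
  let (x, z, m, seen) := b
  (if seen = false then "" else if x ≠ 0 ∧ z ≠ 0 then "Y" else if x ≠ 0 then "X"
     else if z ≠ 0 then "Z" else "I",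
   if x ≠ 0 ∧ z ≠ 0 then pvMulNegI m else m)

set_option maxHeartbeats 1000000 in
lemma pvStep_comm (ch : Char) (b : Int × Int × (Int × Int) × Bool) (h : pvWF b) :
    pvStepA (pvAbs b) ch = pvAbs (pvStepB b ch) ∧ pvWF (pvStepB b ch) := by
  obtain ⟨x, z, m, seen⟩ := b
  obtain ⟨hx, hz, hs⟩ := h
  dsimp only at hx hz hs
  by_cases hI : ch = 'I'
  · subst hI
    cases seen <;> rcases hx with rfl | rfl <;> rcases hz with rfl | rfl <;>
      simp_all [pvStepA, pvStepB, pvAbs, pvMulC, pvMulI, pvMulNegI, pvPauliOps, pvWF,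
        PySem.Int.mod] <;> decide
  by_cases hX : ch = 'X'
  · subst hX
    cases seen <;> rcases hx with rfl | rfl <;> rcases hz with rfl | rfl <;>
      simp_all [pvStepA, pvStepB, pvAbs, pvMulC, pvMulI, pvMulNegI, pvPauliOps, pvWF,
        PySem.Int.mod] <;> decide
  by_cases hY : ch = 'Y'
  · subst hY
    cases seen <;> rcases hx with rfl | rfl <;> rcases hz with rfl | rfl <;>
      simp_all [pvStepA, pvStepB, pvAbs, pvMulC, pvMulI, pvMulNegI, pvPauliOps, pvWF,
        PySem.Int.mod] <;> decide
  by_cases hZ : ch = 'Z'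
  · subst hZ
    cases seen <;> rcases hx with rfl | rfl <;> rcases hz with rfl | rfl <;>
      simp_all [pvStepA, pvStepB, pvAbs, pvMulC, pvMulI, pvMulNegI, pvPauliOps, pvWF,
        PySem.Int.mod] <;> decide
  have hmem : ch ∉ pvPauliOps := by simp [pvPauliOps, hI, hX, hY, hZ]
  by_cases hD : PySem.Chars.isdigit ch = true
  · refine ⟨?_, ?_⟩
    · cases seen <;> rcases hx with rfl | rfl <;> rcases hz with rfl | rfl <;>
        simp_all [pvStepA, pvStepB, pvAbs, pvMulNegI]
    · simp only [pvStepB, if_neg hmem, if_pos hD]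
      exact ⟨hx, hz, hs⟩
  · simp [pvStepA, pvStepB, hmem, hD]
    exact ⟨hx, hz, hs⟩

lemma pvFold_comm (l : List Char) (b : Int × Int × (Int × Int) × Bool) (h : pvWF b) :
    l.foldl pvStepA (pvAbs b) = pvAbs (l.foldl pvStepB b) ∧ pvWF (l.foldl pvStepB b) := by
  induction l generalizing b with
  | nil => exact ⟨rfl, h⟩
  | cons c t ih =>
    obtain ⟨h1, h2⟩ := pvStep_comm c b h
    simpa [h1] using ih (pvStepB b c) h2

lemma pvFinal (b : Int × Int × (Int × Int) × Bool) (h : pvWF b) :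
    (let st := pvAbs b
     if st.2 = ((1 : Int), (0 : Int)) then st.1
     else if st.2 = ((-1 : Int), (0 : Int)) then "-" ++ st.1
     else if st.2 = ((0 : Int), (1 : Int)) then "i" ++ st.1
     else if st.2 = ((0 : Int), (-1 : Int)) then "-i" ++ st.1
     else "") =
    (let (x, z, m, seen) := b
     let op_m : String × (Int × Int) :=
       if seen = false then ("", m)
       else if x ≠ 0 ∧ z ≠ 0 then ("Y", pvMulNegI m)
       else if x ≠ 0 then ("X", m)
       else if z ≠ 0 then ("Z", m)
       else ("I", m)
     if op_m.2 = ((1 : Int), (0 : Int)) then op_m.1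
     else if op_m.2 = ((-1 : Int), (0 : Int)) then "-" ++ op_m.1
     else if op_m.2 = ((0 : Int), (1 : Int)) then "i" ++ op_m.1
     else if op_m.2 = ((0 : Int), (-1 : Int)) then "-i" ++ op_m.1
     else "") := by
  obtain ⟨x, z, m, seen⟩ := b
  obtain ⟨a, c⟩ := m
  obtain ⟨hx, hz, -⟩ := h
  dsimp only at hx hz
  cases seen <;> rcases hx with rfl | rfl <;> rcases hz with rfl | rfl <;>
    simp_all [pvAbs, pvMulNegI, Prod.ext_iff] <;> split_ifs <;> simp_all

-- ===== VERDICT (by name: the statement is the Claim_ definition above) =====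
theorem simplify_pauli_string_spec : Claim_equal_simplify_pauli_string := by
  intro s _
  unfold Spec_simplify_pauli_string simplify_pauli_string simplify_pauli_string_alt
  have hwf : pvWF (0, 0, (1, 0), false) := by simp [pvWF]
  obtain ⟨h1, h2⟩ := pvFold_comm s.toList (0, 0, (1, 0), false) hwf
  have h0 : pvAbs (0, 0, (1, 0), false) = ("", (1, 0)) := by decide
  rw [← h0, h1]
  exact pvFinal _ h2
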